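-- pv_equiv track=rewrite | github.com/Solpo/advent_of_code | 10/kytkennat2.py | reitteja_valilla
-- ===== SOURCE A (Python) =====
-- def reitteja_valilla(lahtoindeksi: int, maalin_indeksi: int, lista: list) -> int:
--     reitteja = 0
--     if lahtoindeksi == maalin_indeksi:
--         return 1
--     if lista[lahtoindeksi] + 3 <= lista[maalin_indeksi] and lista[lahtoindeksi] + 3 in lista:
--         reitteja += reitteja_valilla(lista.index(lista[lahtoindeksi] + 3), maalin_indeksi, lista)
--     if lista[lahtoindeksi] + 2 <= lista[maalin_indeksi] and lista[lahtoindeksi] + 2 in lista: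
--         reitteja += reitteja_valilla(lista.index(lista[lahtoindeksi] + 2), maalin_indeksi, lista)
--     if lista[lahtoindeksi] + 1 <= lista[maalin_indeksi] and lista[lahtoindeksi] + 1 in lista:
--         reitteja += reitteja_valilla(lista.index(lista[lahtoindeksi] + 1), maalin_indeksi, lista)
--     return reitteja
-- ===== SOURCE B (Python) =====
-- def reitteja_valilla(lahtoindeksi: int, maalin_indeksi: int, lista: list) -> int:
--     if lahtoindeksi == maalin_indeksi:
--         return 1
--     t = lista[maalin_indeksi]
--     v0 = lista[lahtoindeksi]
--     first = {}
--     for i, x in enumerate(lista):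
--         if x not in first:
--             first[x] = i
--     g = {}
--     for v in sorted(first, reverse=True):
--         if v > t:
--             continue
--         if first[v] == maalin_indeksi:
--             g[v] = 1
--         else:
--             g[v] = g.get(v + 1, 0) + g.get(v + 2, 0) + g.get(v + 3, 0)
--     return g.get(v0 + 1, 0) + g.get(v0 + 2, 0) + g.get(v0 + 3, 0)
-- ===== Notes on version B (the rewrite author's own statement) =====
-- stated objective: alternative
-- what changed: A's branching recursion over list indices (exponential on chains of consecutive values) is replaced by one bottom-up dynamic-programming pass: a first-occurrence-index dict and a count dict filled over the distinct values in descending order, so each value's path count is computed once; it trades A's cheap behaviour on sparse random data for worst-case-safe single-pass counting.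
import Mathlib
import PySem

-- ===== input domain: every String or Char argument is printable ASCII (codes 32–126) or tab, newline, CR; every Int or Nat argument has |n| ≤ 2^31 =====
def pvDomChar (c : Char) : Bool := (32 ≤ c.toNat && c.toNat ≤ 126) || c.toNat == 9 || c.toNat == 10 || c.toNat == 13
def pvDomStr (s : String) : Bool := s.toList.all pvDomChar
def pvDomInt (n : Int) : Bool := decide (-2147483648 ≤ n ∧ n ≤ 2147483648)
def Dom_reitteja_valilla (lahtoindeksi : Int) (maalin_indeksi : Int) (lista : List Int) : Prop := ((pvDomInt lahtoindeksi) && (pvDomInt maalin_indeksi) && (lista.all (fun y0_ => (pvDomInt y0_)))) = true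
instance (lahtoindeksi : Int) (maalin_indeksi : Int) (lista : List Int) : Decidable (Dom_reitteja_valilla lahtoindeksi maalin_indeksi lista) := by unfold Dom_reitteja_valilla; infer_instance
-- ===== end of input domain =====

-- B replaces A's branching recursion over indices by one bottom-up DP pass over the distinct
-- values in descending order (first-index dict + count dict), computing each count once.

-- ===== PORT A =====
-- termination helper for A's recursion (cited by decreasing_by): the value at the
-- recursed-to index is the searched value, which strictly grows toward lista[maalin_indeksi]
theorem pv_index_pyGet (lista : List Int) (x : Int) (j : Nat)
    (h : PySem.List.index? lista x = some j) : PySem.List.pyGet? lista (j : Int) = some x := by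
  obtain ⟨hk, hx, -⟩ := PySem.List.getElem_of_index?_eq_some h
  rw [PySem.List.pyGet?_natCast]
  simp [hk, hx]

def reitteja_valilla (lahtoindeksi : Int) (maalin_indeksi : Int) (lista : List Int) : Int :=
  if lahtoindeksi = maalin_indeksi then 1
  else
    match h1 : PySem.List.pyGet? lista lahtoindeksi, h2 : PySem.List.pyGet? lista maalin_indeksi with
    | some v, some t =>
      (if _h3 : v + 3 ≤ t ∧ (v + 3) ∈ lista then
          match h3i : PySem.List.index? lista (v + 3) with
          | some j => reitteja_valilla (j : Int) maalin_indeksi lista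
          | none => 0
        else 0)
      + (if _h4 : v + 2 ≤ t ∧ (v + 2) ∈ lista then
          match h4i : PySem.List.index? lista (v + 2) with
          | some j => reitteja_valilla (j : Int) maalin_indeksi lista
          | none => 0
        else 0)
      + (if _h5 : v + 1 ≤ t ∧ (v + 1) ∈ lista then
          match h5i : PySem.List.index? lista (v + 1) with
          | some j => reitteja_valilla (j : Int) maalin_indeksi lista
          | none => 0
        else 0)
    | _, _ => 0
termination_by (match PySem.List.pyGet? lista maalin_indeksi, PySem.List.pyGet? lista lahtoindeksi with
  | some t, some v => (t - v).toNat | _, _ => 0)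
decreasing_by
  · have := pv_index_pyGet lista (v + 3) j h3i
    simp [h1, h2, this]; omega
  · have := pv_index_pyGet lista (v + 2) j h4i
    simp [h1, h2, this]; omega
  · have := pv_index_pyGet lista (v + 1) j h5i
    simp [h1, h2, this]; omega

-- ===== PORT B =====
-- first-occurrence index of every value (Python: dict built over enumerate(lista))
def pvFirst (lista : List Int) : PySem.Dict Int Int :=
  (PySem.List.enumerate lista 0).foldl
    (fun d p => if d.contains p.2 then d else d.insert p.2 p.1) PySem.Dict.empty

-- one iteration of B's descending-value DP loop
def pvStep (maalin_indeksi t : Int) (lista : List Int)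
    (g : PySem.Dict Int Int) (v : Int) : PySem.Dict Int Int :=
  if t < v then g
  else if (pvFirst lista).getD v 0 = maalin_indeksi then g.insert v 1
  else g.insert v (g.getD (v + 1) 0 + g.getD (v + 2) 0 + g.getD (v + 3) 0)

def reitteja_valilla_alt (lahtoindeksi : Int) (maalin_indeksi : Int) (lista : List Int) : Int :=
  if lahtoindeksi = maalin_indeksi then 1
  else
    match PySem.List.pyGet? lista maalin_indeksi with
    | none => 0
    | some t =>
      match PySem.List.pyGet? lista lahtoindeksi with
      | none => 0
      | some v0 =>
        let g : PySem.Dict Int Int :=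
          (PySem.List.sorted (pvFirst lista).keys (fun x => x) true).foldl
            (pvStep maalin_indeksi t lista) PySem.Dict.empty
        g.getD (v0 + 1) 0 + g.getD (v0 + 2) 0 + g.getD (v0 + 3) 0

-- ===== PRECONDITION & SPEC =====
-- Pre_ excludes exactly the inputs where Python A raises IndexError: an out-of-range
-- lahtoindeksi or maalin_indeksi (unless they are equal, where A returns 1 without indexing).
def Pre_reitteja_valilla (lahtoindeksi : Int) (maalin_indeksi : Int) (lista : List Int) : Prop :=
  lahtoindeksi = maalin_indeksi ∨
    (PySem.Raise.InRange lista.length lahtoindeksi ∧ PySem.Raise.InRange lista.length maalin_indeksi)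
instance (lahtoindeksi : Int) (maalin_indeksi : Int) (lista : List Int) : Decidable (Pre_reitteja_valilla lahtoindeksi maalin_indeksi lista) := by unfold Pre_reitteja_valilla; infer_instance

def pvWitness_reitteja_valilla : Int × Int × List Int := (0, 2, [1, 2, 3])

def Spec_reitteja_valilla (lahtoindeksi : Int) (maalin_indeksi : Int) (lista : List Int) (out : Int) : Prop := out = reitteja_valilla_alt lahtoindeksi maalin_indeksi lista
instance (lahtoindeksi : Int) (maalin_indeksi : Int) (lista : List Int) (out : Int) : Decidable (Spec_reitteja_valilla lahtoindeksi maalin_indeksi lista out) := by unfold Spec_reitteja_valilla; infer_instance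

-- ===== CLAIM (what is proved, stated in full; the proofs are below) =====
def Claim_equal_reitteja_valilla : Prop := ∀ (lahtoindeksi : Int) (maalin_indeksi : Int) (lista : List Int), Dom_reitteja_valilla lahtoindeksi maalin_indeksi lista → Pre_reitteja_valilla lahtoindeksi maalin_indeksi lista → Spec_reitteja_valilla lahtoindeksi maalin_indeksi lista (reitteja_valilla lahtoindeksi maalin_indeksi lista)

-- ===== LEMMAS AND PROOFS =====

-- reference function: number of A-paths from the first index of value v up to maalin_indeksi
def Gref (maalin_indeksi t : Int) (lista : List Int) (v : Int) : Int :=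
  if hm : v ∈ lista ∧ v ≤ t then
    match PySem.List.index? lista v with
    | some j =>
      if (j : Int) = maalin_indeksi then 1
      else if _hv : v < t then
        Gref maalin_indeksi t lista (v + 1) + Gref maalin_indeksi t lista (v + 2)
          + Gref maalin_indeksi t lista (v + 3)
      else 0
    | none => 0
  else 0
termination_by (t - v).toNat
decreasing_by all_goals (obtain ⟨-, h⟩ := hm; omega)

theorem Gref_zero (mi t : Int) (lista : List Int) (v : Int)
    (h : ¬(v ∈ lista ∧ v ≤ t)) : Gref mi t lista v = 0 := by
  rw [Gref]; simp [h]

theorem Gref_of_mem (mi t : Int) (lista : List Int) (v : Int) (j : Nat)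
    (hmem : v ∈ lista) (hle : v ≤ t) (hj : PySem.List.index? lista v = some j) :
    Gref mi t lista v
    = if (j : Int) = mi then 1
      else if v < t then
        Gref mi t lista (v + 1) + Gref mi t lista (v + 2) + Gref mi t lista (v + 3)
      else 0 := by
  rw [Gref, dif_pos ⟨hmem, hle⟩]
  rw [PySem.List.index?_eq_idxOf?] at hj
  simp only [PySem.List.index?_eq_idxOf?, hj]
  split_ifs <;> rfl

theorem index?_of_mem (lista : List Int) (v : Int) (h : v ∈ lista) :
    ∃ j, PySem.List.index? lista v = some j := by
  have := PySem.List.index?_isSome_iff (xs := lista) (v := v)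
  cases hx : PySem.List.index? lista v
  · rw [hx] at this; simp at this; exact absurd h this
  · exact ⟨_, rfl⟩

theorem pvFirst_aux_get (xs : List Int) : ∀ (s : Int) (d : PySem.Dict Int Int) (x : Int),
    ((PySem.List.enumerate xs s).foldl
        (fun d p => if d.contains p.2 then d else d.insert p.2 p.1) d).get? x
    = match d.get? x with
      | some i => some i
      | none => (PySem.List.index? xs x).map (fun n => ((n : Int) + s)) := by
  induction xs with
  | nil => intro s d x; cases h : d.get? x <;> simp [PySem.List.enumerate_nil, h]
  | cons y ys ih =>
    intro s d x
    rw [PySem.List.enumerate_cons]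
    simp only [List.foldl_cons]
    rw [ih]
    by_cases hc : d.contains y = true
    · simp only [hc, if_pos]
      cases hd : d.get? x with
      | some i => simp
      | none =>
        simp only [hd]
        have hne : y ≠ x := by
          intro he; subst he
          rw [PySem.Dict.contains_eq_isSome_get?, hd] at hc; simp at hc
        rw [PySem.List.index?_cons_of_ne ys hne]
        cases PySem.List.index? ys x <;> simp <;> ring
    · rw [if_neg hc]
      by_cases hxy : x = y
      · subst hxy
        rw [PySem.Dict.get?_insert_self]
        have hd : d.get? x = none := by
          rw [PySem.Dict.contains_eq_isSome_get?] at hc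
          cases h : d.get? x <;> simp [h] at hc ⊢
        simp only [hd]
        rw [PySem.List.index?_cons_self]
        simp
      · rw [PySem.Dict.get?_insert_of_ne _ _ hxy]
        cases hd : d.get? x with
        | some i => simp [hd]
        | none =>
          simp only [hd]
          rw [PySem.List.index?_cons_of_ne ys (Ne.symm hxy)]
          cases PySem.List.index? ys x <;> simp <;> ring

theorem pvFirst_get (lista : List Int) (x : Int) :
    (pvFirst lista).get? x = (PySem.List.index? lista x).map (fun n => (n : Int)) := by
  rw [pvFirst, pvFirst_aux_get]
  simp [PySem.Dict.get?_empty]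

theorem pvFirst_aux_nodup (xs : List Int) : ∀ (s : Int) (d : PySem.Dict Int Int),
    d.keys.Nodup →
    ((PySem.List.enumerate xs s).foldl
        (fun d p => if d.contains p.2 then d else d.insert p.2 p.1) d).keys.Nodup := by
  induction xs with
  | nil => intro s d h; simpa [PySem.List.enumerate_nil] using h
  | cons y ys ih =>
    intro s d h
    rw [PySem.List.enumerate_cons]
    simp only [List.foldl_cons]
    by_cases hc : d.contains y = true
    · rw [if_pos hc]; exact ih _ _ h
    · rw [if_neg hc]; exact ih _ _ (PySem.Dict.nodup_keys_insert _ _ _ h)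

theorem pvFirst_mem_keys (lista : List Int) (x : Int) :
    x ∈ (pvFirst lista).keys ↔ x ∈ lista := by
  rw [← PySem.Dict.contains_iff_mem_keys, PySem.Dict.contains_eq_isSome_get?, pvFirst_get]
  cases hi : PySem.List.index? lista x with
  | none => rw [PySem.List.index?_eq_none_iff] at hi; simp [hi]
  | some j =>
    have : x ∈ lista := by
      rw [← PySem.List.index?_isSome_iff]; rw [hi]; rfl
    simp [this]

-- the DP fold computes Gref on every present value ≤ t
theorem g_fold (mi t : Int) (lista : List Int) :
    ∀ (vs : List Int) (g0 : PySem.Dict Int Int),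
    (∀ v ∈ vs, v ∈ lista) → vs.Pairwise (fun a b => b < a) →
    (∀ w, g0.get? w = if w ∈ lista ∧ w ≤ t ∧ w ∉ vs then some (Gref mi t lista w) else none) →
    ∀ w, (vs.foldl (pvStep mi t lista) g0).get? w
      = if w ∈ lista ∧ w ≤ t then some (Gref mi t lista w) else none := by
  intro vs
  induction vs with
  | nil => intro g0 _ _ hg0 w; simpa using hg0 w
  | cons v tl ih =>
    intro g0 hsub hpw hg0 w
    have hlt : ∀ u ∈ tl, u < v := (List.pairwise_cons.mp hpw).1
    have hvnotl : v ∉ tl := fun h => absurd (hlt v h) (lt_irrefl v)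
    simp only [List.foldl_cons]
    apply ih
    · exact fun u hu => hsub u (List.mem_cons_of_mem _ hu)
    · exact (List.pairwise_cons.mp hpw).2
    · intro u
      by_cases hvt : t < v
      · rw [pvStep, if_pos hvt, hg0 u]
        by_cases huv : u = v
        · subst huv
          rw [if_neg (by tauto), if_neg (by intro h; exact absurd h.2.1 (not_le.mpr hvt))]
        · have : (u ∈ lista ∧ u ≤ t ∧ u ∉ v :: tl) ↔ (u ∈ lista ∧ u ≤ t ∧ u ∉ tl) := by
            simp [List.mem_cons, huv]
          exact if_congr this rfl rfl
      · have hvle : v ≤ t := not_lt.mp hvt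
        have hvmem : v ∈ lista := hsub v (List.mem_cons_self)
        obtain ⟨j, hj⟩ := index?_of_mem lista v hvmem
        have hfirst : (pvFirst lista).getD v 0 = (j : Int) := by
          rw [PySem.Dict.getD_eq_get?_getD, pvFirst_get, hj]; rfl
        have hGv : Gref mi t lista v
            = if (j : Int) = mi then 1
              else if v < t then
                Gref mi t lista (v + 1) + Gref mi t lista (v + 2) + Gref mi t lista (v + 3)
              else 0 := Gref_of_mem mi t lista v j hvmem hvle hj
        have hget : ∀ k : Int, 1 ≤ k → g0.getD (v + k) 0 = Gref mi t lista (v + k) := by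
          intro k hk
          have hnot : v + k ∉ v :: tl := by
            intro h
            rcases List.mem_cons.mp h with h | h
            · omega
            · exact absurd (hlt _ h) (by omega)
          rw [PySem.Dict.getD_eq_get?_getD, hg0 (v + k)]
          by_cases hmk : v + k ∈ lista ∧ v + k ≤ t
          · rw [if_pos ⟨hmk.1, hmk.2, hnot⟩]; rfl
          · rw [if_neg (by tauto), Gref_zero mi t lista _ hmk]; rfl
        have hval : ∀ (x : Int), (pvStep mi t lista g0 v).get? x
            = if x = v then some (Gref mi t lista v) else g0.get? x := by
          intro x
          rw [pvStep, if_neg hvt, hfirst]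
          by_cases hjm : (j : Int) = mi
          · rw [if_pos hjm, PySem.Dict.get?_insert, hGv, if_pos hjm]
          · rw [if_neg hjm, PySem.Dict.get?_insert, hGv, if_neg hjm]
            rw [hget 1 (by omega), hget 2 (by omega), hget 3 (by omega)]
            by_cases hvlt : v < t
            · rw [if_pos hvlt]
            · rw [if_neg hvlt]
              have hz : ∀ k : Int, 1 ≤ k → Gref mi t lista (v + k) = 0 := by
                intro k hk
                exact Gref_zero mi t lista _ (by intro h; have := h.2; omega)
              rw [hz 1 (by omega), hz 2 (by omega), hz 3 (by omega)]
              norm_num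
        rw [hval u]
        by_cases huv : u = v
        · subst huv; rw [if_pos rfl, if_pos ⟨hvmem, hvle, hvnotl⟩]
        · rw [if_neg huv, hg0 u]
          have : (u ∈ lista ∧ u ≤ t ∧ u ∉ v :: tl) ↔ (u ∈ lista ∧ u ≤ t ∧ u ∉ tl) := by
            simp [List.mem_cons, huv]
          exact if_congr this rfl rfl

-- A's recursion computes Gref at first indices
theorem A_at_first (mi t : Int) (lista : List Int)
    (h2 : PySem.List.pyGet? lista mi = some t) :
    ∀ (n : Nat) (v : Int) (j : Nat), (t - v).toNat < n → v ∈ lista → v ≤ t →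
      PySem.List.index? lista v = some j →
      reitteja_valilla (j : Int) mi lista = Gref mi t lista v := by
  intro n
  induction n using Nat.strong_induction_on with
  | _ n ih =>
    intro v j hn hmem hle hj
    have hjv : PySem.List.pyGet? lista (j : Int) = some v := pv_index_pyGet lista v j hj
    rw [reitteja_valilla]
    by_cases hjm : (j : Int) = mi
    · rw [if_pos hjm, Gref_of_mem mi t lista v j hmem hle hj, if_pos hjm]
    · rw [if_neg hjm]
      have hbranch : ∀ k : Int, 1 ≤ k →
          (if h : v + k ≤ t ∧ (v + k) ∈ lista then
            match _hh : PySem.List.index? lista (v + k) with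
            | some j => reitteja_valilla (j : Int) mi lista
            | none => 0
          else 0) = Gref mi t lista (v + k) := by
        intro k hk
        by_cases hc : v + k ≤ t ∧ (v + k) ∈ lista
        · rw [dif_pos hc]
          split
          next jk hjk =>
            exact ih (t - v).toNat hn (v + k) jk (by omega) hc.2 hc.1 hjk
          next hjk =>
            rw [PySem.List.index?_eq_none_iff] at hjk
            exact absurd hc.2 hjk
        · rw [dif_neg hc, Gref_zero mi t lista _ (by tauto)]
      split
      next v' t' hv' ht' =>
        rw [hjv] at hv'
        rw [h2] at ht'
        injection hv' with hv'
        injection ht' with ht'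
        subst hv'; subst ht'
        rw [Gref_of_mem mi t lista v j hmem hle hj, if_neg hjm]
        rw [hbranch 3 (by omega), hbranch 2 (by omega), hbranch 1 (by omega)]
        by_cases hvlt : v < t
        · rw [if_pos hvlt]; ring
        · rw [if_neg hvlt]
          have hz : ∀ k : Int, 1 ≤ k → Gref mi t lista (v + k) = 0 := fun k _hk =>
            Gref_zero mi t lista _ (by intro h; have := h.1; omega)
          rw [hz 1 (by omega), hz 2 (by omega), hz 3 (by omega)]
          norm_num
      next h => exact (h v t hjv h2).elim

-- ===== VERDICT (by name: the statement is the Claim_ definition above) =====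
theorem reitteja_valilla_spec : Claim_equal_reitteja_valilla := by
  intro li mi lista _hdom hpre
  unfold Spec_reitteja_valilla
  by_cases hlm : li = mi
  · rw [reitteja_valilla, reitteja_valilla_alt, if_pos hlm, if_pos hlm]
  · rcases hpre with hpre | ⟨hli, hmi⟩
    · exact absurd hpre hlm
    obtain ⟨v0, hv0⟩ : ∃ v0, PySem.List.pyGet? lista li = some v0 := by
      cases h : PySem.List.pyGet? lista li
      · exact absurd ((PySem.List.pyGet?_eq_none_iff lista li).mp h) (by simpa using hli)
      · exact ⟨_, rfl⟩
    obtain ⟨t, ht⟩ : ∃ t, PySem.List.pyGet? lista mi = some t := by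
      cases h : PySem.List.pyGet? lista mi
      · exact absurd ((PySem.List.pyGet?_eq_none_iff lista mi).mp h) (by simpa using hmi)
      · exact ⟨_, rfl⟩
    have hv0mem : v0 ∈ lista := PySem.List.mem_of_pyGet?_eq_some lista hv0
    -- the final DP dictionary
    set vs := PySem.List.sorted (pvFirst lista).keys (fun x => x) true with hvs
    have hsub : ∀ v ∈ vs, v ∈ lista := by
      intro v hv
      rw [hvs, PySem.List.mem_sorted] at hv
      exact (pvFirst_mem_keys lista v).mp hv
    have hnodup : vs.Nodup := by
      have hk : (pvFirst lista).keys.Nodup :=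
        pvFirst_aux_nodup lista 0 PySem.Dict.empty (by simp [PySem.Dict.keys_empty])
      exact ((PySem.List.sorted_perm (pvFirst lista).keys (fun x => x) true).nodup_iff).mpr hk
    have hpw : vs.Pairwise (fun a b => b < a) := by
      have h1 : vs.Pairwise (fun a b => b ≤ a) :=
        PySem.List.sorted_pairwise_rev (pvFirst lista).keys (fun x => x)
      have h2 : vs.Pairwise (fun a b => a ≠ b) := hnodup
      exact (h1.and h2).imp (fun h => lt_of_le_of_ne h.1 (Ne.symm h.2))
    have hcomplete : ∀ w : Int, w ∈ lista → w ∈ vs := by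
      intro w hw
      rw [hvs, PySem.List.mem_sorted]
      exact (pvFirst_mem_keys lista w).mpr hw
    have hG : ∀ w, ((vs.foldl (pvStep mi t lista) PySem.Dict.empty)).get? w
        = if w ∈ lista ∧ w ≤ t then some (Gref mi t lista w) else none := by
      apply g_fold mi t lista vs PySem.Dict.empty hsub hpw
      intro w
      rw [PySem.Dict.get?_empty, if_neg]
      intro ⟨hw1, _, hw3⟩
      exact hw3 (hcomplete w hw1)
    have hgetD : ∀ k : Int, 1 ≤ k →
        (vs.foldl (pvStep mi t lista) PySem.Dict.empty).getD (v0 + k) 0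
          = Gref mi t lista (v0 + k) := by
      intro k _hk
      rw [PySem.Dict.getD_eq_get?_getD, hG (v0 + k)]
      by_cases hmk : v0 + k ∈ lista ∧ v0 + k ≤ t
      · rw [if_pos hmk]; rfl
      · rw [if_neg hmk, Gref_zero mi t lista _ hmk]; rfl
    have hbranch : ∀ k : Int, 1 ≤ k →
        (if h : v0 + k ≤ t ∧ (v0 + k) ∈ lista then
          match _hh : PySem.List.index? lista (v0 + k) with
          | some j => reitteja_valilla (j : Int) mi lista
          | none => 0
        else 0) = Gref mi t lista (v0 + k) := by
      intro k _hk
      by_cases hc : v0 + k ≤ t ∧ (v0 + k) ∈ lista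
      · rw [dif_pos hc]
        split
        next jk hjk =>
          exact A_at_first mi t lista ht ((t - (v0 + k)).toNat + 1) (v0 + k) jk
            (by omega) hc.2 hc.1 hjk
        next hjk =>
          rw [PySem.List.index?_eq_none_iff] at hjk
          exact absurd hc.2 hjk
      · rw [dif_neg hc, Gref_zero mi t lista _ (by tauto)]
    rw [reitteja_valilla, reitteja_valilla_alt, if_neg hlm, if_neg hlm]
    simp only [hv0, ht]
    split
    next v t' hv ht' =>
      rw [hv0] at hv
      rw [ht] at ht'
      injection hv with hv; injection ht' with ht'
      subst hv; subst ht'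
      rw [hbranch 3 (by omega), hbranch 2 (by omega), hbranch 1 (by omega)]
      rw [hgetD 1 (by omega), hgetD 2 (by omega), hgetD 3 (by omega)]
      ring
    next h =>
      exact (h v0 t hv0 ht).elim
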